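-- pv_equiv track=rewrite | github.com/subinyy/IS_NetShield | feature_engineering.py | _tld_risk_score
-- ===== SOURCE A (Python) =====
-- def _tld_risk_score(domain: str) -> int:
--     """
--     TLD 위험 점수 반환
--     0: 안전, 1: 주의, 2: 위험
--     출처: Spamhaus TLD 악용 통계 기반
--     """
--     high_risk_tlds = {".tk", ".ml", ".ga", ".cf", ".gq", ".xyz", ".top", ".work", ".click"}
--     medium_risk_tlds = {".info", ".biz", ".online", ".site", ".ru", ".cn"}
--
--     domain_lower = domain.lower()
--     if any(domain_lower.endswith(tld) for tld in high_risk_tlds):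
--         return 2
--     if any(domain_lower.endswith(tld) for tld in medium_risk_tlds):
--         return 1
--     return 0
-- ===== SOURCE B (Python) =====
-- _TLD_SCORES = {
--     "tk": 2, "ml": 2, "ga": 2, "cf": 2, "gq": 2,
--     "xyz": 2, "top": 2, "work": 2, "click": 2,
--     "info": 1, "biz": 1, "online": 1, "site": 1, "ru": 1, "cn": 1,
-- }
--
--
-- def _tld_risk_score(domain: str) -> int:
--     # Split off the final label after the last dot and score it with one
--     # dict lookup; a domain without any dot can match no ".xxx" suffix.
--     lower = domain.lower()
--     if "." not in lower:
--         return 0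
--     return _TLD_SCORES.get(lower.rsplit(".", 1)[-1], 0)
-- ===== Notes on version B (the rewrite author's own statement) =====
-- stated objective: idiomatic
-- what changed: Replaced the two any()-scans testing endswith against 15 TLD suffixes by extracting the final label after the last dot (rsplit) and scoring it with a single dict lookup keyed by the bare TLD name.
import Mathlib
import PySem

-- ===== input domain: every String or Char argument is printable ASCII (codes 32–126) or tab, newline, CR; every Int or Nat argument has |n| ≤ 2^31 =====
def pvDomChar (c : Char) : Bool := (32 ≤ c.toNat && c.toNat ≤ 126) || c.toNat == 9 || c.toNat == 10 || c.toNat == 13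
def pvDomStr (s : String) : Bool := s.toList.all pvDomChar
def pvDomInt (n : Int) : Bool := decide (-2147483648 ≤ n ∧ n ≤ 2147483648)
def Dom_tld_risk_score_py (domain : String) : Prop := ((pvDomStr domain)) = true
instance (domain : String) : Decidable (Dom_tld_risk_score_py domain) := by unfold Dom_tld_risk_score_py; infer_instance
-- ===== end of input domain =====

-- B replaces A's 15 endswith scans by extracting the label after the last dot and one dict lookup (idiomatic decomposition).

-- ===== PORT A =====
def pvHighRiskTlds : List (List Char) :=
  [['.','t','k'], ['.','m','l'], ['.','g','a'], ['.','c','f'], ['.','g','q'],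
   ['.','x','y','z'], ['.','t','o','p'], ['.','w','o','r','k'], ['.','c','l','i','c','k']]

def pvMediumRiskTlds : List (List Char) :=
  [['.','i','n','f','o'], ['.','b','i','z'], ['.','o','n','l','i','n','e'],
   ['.','s','i','t','e'], ['.','r','u'], ['.','c','n']]

def tld_risk_score_py (domain : String) : Int :=
  let domainLower := PySem.Chars.lower domain.toList
  if pvHighRiskTlds.any (fun tld => PySem.Chars.endswith domainLower tld) then 2
  else if pvMediumRiskTlds.any (fun tld => PySem.Chars.endswith domainLower tld) then 1
  else 0

-- ===== PORT B =====
def pvTldScores : PySem.Dict (List Char) Int := PySem.Dict.ofList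
  [(['t','k'], 2), (['m','l'], 2), (['g','a'], 2), (['c','f'], 2), (['g','q'], 2),
   (['x','y','z'], 2), (['t','o','p'], 2), (['w','o','r','k'], 2), (['c','l','i','c','k'], 2),
   (['i','n','f','o'], 1), (['b','i','z'], 1), (['o','n','l','i','n','e'], 1),
   (['s','i','t','e'], 1), (['r','u'], 1), (['c','n'], 1)]

-- hand port of lower.rsplit(".", 1)[-1] when "." ∈ lower: the segment after the
-- LAST '.' — exact because the characters of l after the last dot are precisely
-- the longest dot-free suffix, i.e. reverse of takeWhile (· ≠ '.') on l.reverse.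
def pvLastLabel (l : List Char) : List Char :=
  (l.reverse.takeWhile (fun c => c ≠ '.')).reverse

def tld_risk_score_py_alt (domain : String) : Int :=
  let lower := PySem.Chars.lower domain.toList
  if PySem.Chars.isIn ['.'] lower = false then 0
  else PySem.Dict.getD pvTldScores (pvLastLabel lower) 0

-- ===== PRECONDITION & SPEC =====
def Spec_tld_risk_score_py (domain : String) (out : Int) : Prop := out = tld_risk_score_py_alt domain
instance (domain : String) (out : Int) : Decidable (Spec_tld_risk_score_py domain out) := by unfold Spec_tld_risk_score_py; infer_instance

-- ===== CLAIM (what is proved, stated in full; the proofs are below) =====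
def Claim_equal_tld_risk_score_py : Prop := ∀ (domain : String), Dom_tld_risk_score_py domain → Spec_tld_risk_score_py domain (tld_risk_score_py domain)

-- ===== LEMMAS AND PROOFS =====

theorem pvSingletonInfix {l : List Char} : (['.'] <:+: l) ↔ '.' ∈ l := by
  constructor
  · rintro ⟨s, t, rfl⟩; simp
  · intro h
    obtain ⟨s, t, rfl⟩ := List.append_of_mem h
    exact ⟨s, t, by simp⟩

theorem pvTakeWhileFree {p : Char → Bool} {v : List Char} (hv : ∀ c ∈ v, p c = true)
    {c : Char} (hc : p c = false) (t : List Char) :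
    (v ++ c :: t).takeWhile p = v := by
  induction v with
  | nil => simp [hc]
  | cons a v ih =>
    have ha := hv a (by simp)
    simp only [List.cons_append, List.takeWhile_cons, ha, if_true]
    rw [ih (fun x hx => hv x (by simp [hx]))]

theorem pvDropWhileHead {p : Char → Bool} {l : List Char} {a : Char} {rest : List Char}
    (h : l.dropWhile p = a :: rest) : p a = false := by
  induction l with
  | nil => simp at h
  | cons b l ih =>
    rw [List.dropWhile_cons] at h
    by_cases hb : p b = true
    · rw [if_pos hb] at h; exact ih h
    · rw [if_neg hb] at h
      injection h with h1 _
      subst h1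
      simpa using hb

-- the suffix ".w" (w dot-free) is present in l iff l has a dot and its last label is w
theorem pvSuffixIffLastLabel (l w : List Char) (hw : '.' ∉ w) :
    ('.' :: w <:+ l) ↔ ('.' ∈ l ∧ pvLastLabel l = w) := by
  constructor
  · rintro ⟨t, rfl⟩
    refine ⟨by simp, ?_⟩
    unfold pvLastLabel
    have hvv : ∀ c ∈ w.reverse, (fun c => decide (c ≠ '.')) c = true := by
      intro c hc
      simp only [decide_eq_true_eq]
      intro h
      exact hw (h ▸ List.mem_reverse.mp hc)
    rw [List.reverse_append, List.reverse_cons, List.append_assoc, List.singleton_append,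
        pvTakeWhileFree hvv (by simp) t.reverse, List.reverse_reverse]
  · rintro ⟨hmem, hlab⟩
    unfold pvLastLabel at hlab
    have hr : l.reverse.takeWhile (fun c => decide (c ≠ '.')) = w.reverse := by
      have := congrArg List.reverse hlab; simpa using this
    have hdne : l.reverse.dropWhile (fun c => decide (c ≠ '.')) ≠ [] := by
      intro hnil
      have hlw : l.reverse = w.reverse := by
        conv_lhs => rw [← List.takeWhile_append_dropWhile (p := fun c => decide (c ≠ '.')) (l := l.reverse)]
        rw [hr, hnil, List.append_nil]
      have : l = w := by simpa using congrArg List.reverse hlw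
      exact hw (this ▸ hmem)
    rcases hx : l.reverse.dropWhile (fun c => decide (c ≠ '.')) with _ | ⟨a, rest⟩
    · exact absurd hx hdne
    · have ha : a = '.' := by simpa using pvDropWhileHead hx
      refine ⟨rest.reverse, ?_⟩
      have hsplit : l.reverse = w.reverse ++ '.' :: rest := by
        conv_lhs => rw [← List.takeWhile_append_dropWhile (p := fun c => decide (c ≠ '.')) (l := l.reverse)]
        rw [hr, hx, ha]
      have := congrArg List.reverse hsplit
      simpa using this.symm

-- Bool form, ready for rewriting in the any-chains (needs a dot in l)
theorem pvEndswith_eq (l w : List Char) (hl : '.' ∈ l) (hw : '.' ∉ w) :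
    PySem.Chars.endswith l ('.' :: w) = decide (pvLastLabel l = w) := by
  have h := (PySem.Chars.endswith_iff l ('.' :: w)).trans (pvSuffixIffLastLabel l w hw)
  cases hb : PySem.Chars.endswith l ('.' :: w) with
  | true => simp [(h.mp hb).2]
  | false =>
    have hne : ¬ (pvLastLabel l = w) := fun hf => by
      rw [h.mpr ⟨hl, hf⟩] at hb; cases hb
    simp [hne]

theorem pvEndswith_false (l w : List Char) (hl : '.' ∉ l) :
    PySem.Chars.endswith l ('.' :: w) = false := by
  cases hb : PySem.Chars.endswith l ('.' :: w) with
  | false => rfl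
  | true =>
    obtain ⟨t, ht⟩ := (PySem.Chars.endswith_iff l ('.' :: w)).mp hb
    exact absurd (by rw [← ht]; simp : '.' ∈ l) hl

-- ===== VERDICT (by name: the statement is the Claim_ definition above) =====
theorem tld_risk_score_py_spec : Claim_equal_tld_risk_score_py := by
  intro domain _
  show tld_risk_score_py domain = tld_risk_score_py_alt domain
  simp only [tld_risk_score_py, tld_risk_score_py_alt, pvHighRiskTlds, pvMediumRiskTlds,
    List.any_cons, List.any_nil]
  by_cases hl : '.' ∈ PySem.Chars.lower domain.toList
  · have hin : PySem.Chars.isIn ['.'] (PySem.Chars.lower domain.toList) = true := by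
      exact (PySem.Chars.isIn_iff_infix _ _).mpr (pvSingletonInfix.mpr hl)
    conv_rhs => rw [if_neg (by simp [hin])]
    simp only [pvEndswith_eq _ ['t', 'k'] hl (by decide),
      pvEndswith_eq _ ['m', 'l'] hl (by decide),
      pvEndswith_eq _ ['g', 'a'] hl (by decide),
      pvEndswith_eq _ ['c', 'f'] hl (by decide),
      pvEndswith_eq _ ['g', 'q'] hl (by decide),
      pvEndswith_eq _ ['x', 'y', 'z'] hl (by decide),
      pvEndswith_eq _ ['t', 'o', 'p'] hl (by decide),
      pvEndswith_eq _ ['w', 'o', 'r', 'k'] hl (by decide),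
      pvEndswith_eq _ ['c', 'l', 'i', 'c', 'k'] hl (by decide),
      pvEndswith_eq _ ['i', 'n', 'f', 'o'] hl (by decide),
      pvEndswith_eq _ ['b', 'i', 'z'] hl (by decide),
      pvEndswith_eq _ ['o', 'n', 'l', 'i', 'n', 'e'] hl (by decide),
      pvEndswith_eq _ ['s', 'i', 't', 'e'] hl (by decide),
      pvEndswith_eq _ ['r', 'u'] hl (by decide),
      pvEndswith_eq _ ['c', 'n'] hl (by decide)]
    generalize pvLastLabel (PySem.Chars.lower domain.toList) = k
    have hsc : pvTldScores = PySem.Dict.mk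
        [(['t','k'], 2), (['m','l'], 2), (['g','a'], 2), (['c','f'], 2), (['g','q'], 2),
         (['x','y','z'], 2), (['t','o','p'], 2), (['w','o','r','k'], 2), (['c','l','i','c','k'], 2),
         (['i','n','f','o'], 1), (['b','i','z'], 1), (['o','n','l','i','n','e'], 1),
         (['s','i','t','e'], 1), (['r','u'], 1), (['c','n'], 1)] := by decide
    rw [hsc]
    simp only [Bool.or_eq_true, decide_eq_true_eq, Bool.or_false]
    split_ifs with h1 h2
    · rcases h1 with rfl|rfl|rfl|rfl|rfl|rfl|rfl|rfl|rfl <;> decide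
    · rcases h2 with rfl|rfl|rfl|rfl|rfl|rfl <;> decide
    · simp only [not_or] at h1 h2
      obtain ⟨e1,e2,e3,e4,e5,e6,e7,e8,e9⟩ := h1
      obtain ⟨f1,f2,f3,f4,f5,f6⟩ := h2
      simp [PySem.Dict.getD_eq_get?_getD, PySem.Dict.get?_mk_cons, beq_iff_eq,
        Ne.symm e1, Ne.symm e2, Ne.symm e3, Ne.symm e4, Ne.symm e5, Ne.symm e6, Ne.symm e7,
        Ne.symm e8, Ne.symm e9, Ne.symm f1, Ne.symm f2, Ne.symm f3, Ne.symm f4, Ne.symm f5, Ne.symm f6]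
      rfl
  · have hin : PySem.Chars.isIn ['.'] (PySem.Chars.lower domain.toList) = false :=
      (PySem.Chars.isIn_eq_false_iff _ _).mpr (fun h => hl (pvSingletonInfix.mp h))
    conv_rhs => rw [if_pos hin]
    simp only [pvEndswith_false _ ['t','k'] hl, pvEndswith_false _ ['m','l'] hl,
      pvEndswith_false _ ['g','a'] hl, pvEndswith_false _ ['c','f'] hl,
      pvEndswith_false _ ['g','q'] hl, pvEndswith_false _ ['x','y','z'] hl,
      pvEndswith_false _ ['t','o','p'] hl, pvEndswith_false _ ['w','o','r','k'] hl,
      pvEndswith_false _ ['c','l','i','c','k'] hl, pvEndswith_false _ ['i','n','f','o'] hl,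
      pvEndswith_false _ ['b','i','z'] hl, pvEndswith_false _ ['o','n','l','i','n','e'] hl,
      pvEndswith_false _ ['s','i','t','e'] hl, pvEndswith_false _ ['r','u'] hl,
      pvEndswith_false _ ['c','n'] hl]
    simp
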